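-- pv_equiv track=rewrite | github.com/noamoss/yamly | src/yaml_diffs/generic_diff.py | _auto_detect_identity_field
-- ===== SOURCE A (Python) =====
-- from typing import Any
--
-- IDENTITY_FIELD_CANDIDATES = ["id", "_id", "uuid", "key", "name", "host", "hostname"]
--
-- def _auto_detect_identity_field(items: list[Any]) -> str | None:
--     """Auto-detect identity field from common candidates.
--
--     Args:
--         items: List of items to check
--
--     Returns:
--         Identity field name if found, None otherwise
--     """
--     if not items:
--         return None
--
--     # Only check if all items are dicts
--     if not all(isinstance(item, dict) for item in items):
--         return None
--
--     for candidate in IDENTITY_FIELD_CANDIDATES: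
--         if all(candidate in item for item in items):
--             return candidate
--
--     return None
-- ===== SOURCE B (Python) =====
-- IDENTITY_FIELD_CANDIDATES = ["id", "_id", "uuid", "key", "name", "host", "hostname"]
--
-- def _auto_detect_identity_field(items):
--     if not items:
--         return None
--     if not all(isinstance(item, dict) for item in items):
--         return None
--     common = set(items[0])
--     for item in items[1:]:
--         common &= set(item)
--     return next((c for c in IDENTITY_FIELD_CANDIDATES if c in common), None)
-- ===== Notes on version B (the rewrite author's own statement) =====
-- stated objective: simpler
-- what changed: Replaces the per-candidate scan over all items (all(candidate in item for item in items) for each candidate) by one reduction computing the set of keys common to every item, followed by a single membership pass over the candidate list.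
import Mathlib
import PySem

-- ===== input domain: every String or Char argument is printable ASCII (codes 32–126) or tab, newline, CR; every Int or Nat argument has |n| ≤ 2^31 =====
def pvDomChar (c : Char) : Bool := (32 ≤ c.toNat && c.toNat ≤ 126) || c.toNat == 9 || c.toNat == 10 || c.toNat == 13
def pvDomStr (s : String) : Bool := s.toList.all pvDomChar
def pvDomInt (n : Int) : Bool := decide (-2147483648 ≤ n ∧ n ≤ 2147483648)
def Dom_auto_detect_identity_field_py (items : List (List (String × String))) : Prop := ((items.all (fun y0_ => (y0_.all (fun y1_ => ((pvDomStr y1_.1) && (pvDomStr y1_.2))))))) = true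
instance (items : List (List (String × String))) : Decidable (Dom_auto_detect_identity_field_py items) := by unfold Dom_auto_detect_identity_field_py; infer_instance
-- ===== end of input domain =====

-- B replaces A's per-candidate scan over all items by one reduction to the common-key set
-- plus a single membership pass over the candidates (objective: simpler).

def pvCandidates : List String := ["id", "_id", "uuid", "key", "name", "host", "hostname"]

-- ===== PORT A =====
-- the 'for candidate in IDENTITY_FIELD_CANDIDATES' loop with its early return
def pvALoop (items : List (List (String × String))) : List String → Option String
  | [] => none
  | c :: cs =>
    if items.all (fun item => item.any (fun kv => kv.1 == c)) then some c
    else pvALoop items cs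

def auto_detect_identity_field_py (items : List (List (String × String))) : Option String :=
  if items.isEmpty then none
  else if !(items.all (fun _ => true)) then none  -- 'all(isinstance(item, dict) …)': always True under the type convention
  else pvALoop items pvCandidates

-- ===== PORT B =====
def pvKeys (item : List (String × String)) : PySem.Set String :=
  PySem.Set.ofList (item.map Prod.fst)

def auto_detect_identity_field_py_alt (items : List (List (String × String))) : Option String :=
  match items with
  | [] => none
  | first :: rest =>
    if !(items.all (fun _ => true)) then none  -- 'all(isinstance(item, dict) …)': always True under the type convention
    else
      let common := rest.foldl (fun acc item => PySem.Set.inter acc (pvKeys item)) (pvKeys first)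
      pvCandidates.find? (fun c => PySem.Set.contains common c)

-- ===== PRECONDITION & SPEC =====
def Spec_auto_detect_identity_field_py (items : List (List (String × String))) (out : Option String) : Prop := out = auto_detect_identity_field_py_alt items
instance (items : List (List (String × String))) (out : Option String) : Decidable (Spec_auto_detect_identity_field_py items out) := by unfold Spec_auto_detect_identity_field_py; infer_instance

-- ===== CLAIM (what is proved, stated in full; the proofs are below) =====
def Claim_equal_auto_detect_identity_field_py : Prop := ∀ (items : List (List (String × String))), Dom_auto_detect_identity_field_py items → Spec_auto_detect_identity_field_py items (auto_detect_identity_field_py items)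

-- ===== LEMMAS AND PROOFS =====

-- membership in the reduced common-key set = the key is in every item's key set
theorem mem_foldl_inter (rest : List (List (String × String)))
    (acc : PySem.Set String) (c : String) :
    c ∈ rest.foldl (fun a item => PySem.Set.inter a (pvKeys item)) acc ↔
      c ∈ acc ∧ ∀ item ∈ rest, c ∈ pvKeys item := by
  induction rest generalizing acc with
  | nil => simp
  | cons it rest ih =>
    simp [List.foldl_cons, ih, PySem.Set.mem_inter]
    tauto

theorem mem_pvKeys (item : List (String × String)) (c : String) :
    c ∈ pvKeys item ↔ (item.any (fun kv => kv.1 == c)) = true := by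
  simp only [pvKeys, PySem.Set.mem_ofList, List.mem_map, List.any_eq_true, beq_iff_eq]

-- A's candidate loop is find? with any predicate pointwise equal to A's test
theorem pvALoop_eq_find? (items : List (List (String × String)))
    (p : String → Bool)
    (hp : ∀ c, (items.all (fun item => item.any (fun kv => kv.1 == c))) = p c) :
    ∀ cs, pvALoop items cs = cs.find? p := by
  intro cs
  induction cs with
  | nil => rfl
  | cons c cs ih =>
    simp only [pvALoop, List.find?, hp, ih]
    cases p c <;> simp

-- ===== VERDICT (by name: the statement is the Claim_ definition above) =====
theorem auto_detect_identity_field_py_spec : Claim_equal_auto_detect_identity_field_py := by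
  intro items _
  unfold Spec_auto_detect_identity_field_py
  cases items with
  | nil => rfl
  | cons first rest =>
    unfold auto_detect_identity_field_py auto_detect_identity_field_py_alt
    have hg : ((first :: rest).all fun _ => true) = true := by simp
    simp only [List.isEmpty_cons, hg, Bool.not_true, Bool.false_eq_true, if_false]
    refine pvALoop_eq_find? _ _ (fun c => ?_) pvCandidates
    have h := mem_foldl_inter rest (pvKeys first) c
    rw [mem_pvKeys] at h
    rcases hb : PySem.Set.contains
        (rest.foldl (fun a item => PySem.Set.inter a (pvKeys item)) (pvKeys first)) c with _ | _
    · rw [PySem.Set.contains_eq_listContains] at hb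
      simp only [List.contains_eq_mem, decide_eq_false_iff_not] at hb
      rw [h] at hb
      push Not at hb
      simp only [List.all_cons] at *
      by_contra hall
      simp only [Bool.not_eq_false, Bool.and_eq_true, List.all_eq_true] at hall
      rcases hall with ⟨h1, h2⟩
      rcases Classical.em ((first.any fun kv => kv.1 == c) = true) with hf | hf
      · rcases hb hf with ⟨it, hit, hnot⟩
        rw [mem_pvKeys] at hnot
        exact hnot (h2 it hit)
      · exact hf h1
    · rw [PySem.Set.contains_eq_listContains] at hb
      simp only [List.contains_eq_mem, decide_eq_true_eq] at hb
      rw [h] at hb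
      rcases hb with ⟨hf, hr⟩
      simp only [List.all_cons, Bool.and_eq_true, List.all_eq_true]
      exact ⟨hf, fun it hit => (mem_pvKeys it c).mp (hr it hit)⟩
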